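-- pv_equiv track=rewrite | github.com/MulongXie/Research-ReverselyGeneratingWebCode | code/MODULE/img_processing_project/lib/ip_detection_utils.py | get_boundary
-- ===== SOURCE A (Python) =====
-- def get_boundary(area):
--     border_up, border_bottom, border_left, border_right = {}, {}, {}, {}
--     for point in area:
--         # point: (row_index, column_index)
--         # up, bottom: (column_index, min/max row border) detect range of each column
--         if point[1] not in border_up or border_up[point[1]] > point[0]:
--             border_up[point[1]] = point[0]
--         if point[1] not in border_bottom or border_bottom[point[1]] < point[0]:
--             border_bottom[point[1]] = point[0]
--         # left, right: (row_index, min/max column border) detect range of each row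
--         if point[0] not in border_left or border_left[point[0]] > point[1]:
--             border_left[point[0]] = point[1]
--         if point[0] not in border_right or border_right[point[0]] < point[1]:
--             border_right[point[0]] = point[1]
--
--     boundary = [border_up, border_bottom, border_left, border_right]
--     # descending sort
--     for i in range(len(boundary)):
--         boundary[i] = [[k, boundary[i][k]] for k in boundary[i].keys()]
--         boundary[i] = sorted(boundary[i], key=lambda x: x[0])
--     return boundary
-- ===== SOURCE B (Python) =====
-- def get_boundary(area):
--     # group-then-reduce: collect all rows per column and all columns per row,
--     # then derive each border table by one min/max per group, keys sorted ascending
--     cols, rows = {}, {}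
--     for row, col in area:
--         cols.setdefault(col, []).append(row)
--         rows.setdefault(row, []).append(col)
--
--     def table(groups, extremum):
--         return [[k, extremum(groups[k])] for k in sorted(groups)]
--
--     return [table(cols, min), table(cols, max), table(rows, min), table(rows, max)]
-- ===== Notes on version B (the rewrite author's own statement) =====
-- stated objective: alternative
-- what changed: Instead of maintaining four running min/max dicts with conditional updates inside the loop, B groups the points once (rows-per-column and columns-per-row lists) and then derives each border table by one min or max per group over the sorted keys.
import Mathlib
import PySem

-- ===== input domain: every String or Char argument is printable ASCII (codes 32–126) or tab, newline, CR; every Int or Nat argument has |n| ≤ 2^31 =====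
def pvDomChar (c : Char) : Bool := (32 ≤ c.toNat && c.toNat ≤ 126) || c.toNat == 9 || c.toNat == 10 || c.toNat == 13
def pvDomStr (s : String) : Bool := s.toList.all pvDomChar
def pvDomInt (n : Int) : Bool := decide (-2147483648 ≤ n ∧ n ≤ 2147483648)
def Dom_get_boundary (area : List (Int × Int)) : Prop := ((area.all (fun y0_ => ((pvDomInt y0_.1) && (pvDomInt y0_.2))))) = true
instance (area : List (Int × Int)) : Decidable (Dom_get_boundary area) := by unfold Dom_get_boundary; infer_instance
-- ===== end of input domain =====

-- B replaces A's four running min/max dictionaries (conditional update per point) by a single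
-- grouping pass (rows-per-column, columns-per-row) followed by one min/max per group: an
-- alternative decomposition of the same cost.

-- ===== PORT A =====
-- A-side helpers: the four conditional dict updates of A's loop body
-- (Python's 'border[k] > point[0]' is written 'point.1 < d.getD k 0', '<' likewise flipped)
def pvStepUp (d : PySem.Dict Int Int) (point : Int × Int) : PySem.Dict Int Int :=
  if d.contains point.2 = false ∨ point.1 < d.getD point.2 0 then d.insert point.2 point.1 else d

def pvStepBottom (d : PySem.Dict Int Int) (point : Int × Int) : PySem.Dict Int Int :=
  if d.contains point.2 = false ∨ d.getD point.2 0 < point.1 then d.insert point.2 point.1 else d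

def pvStepLeft (d : PySem.Dict Int Int) (point : Int × Int) : PySem.Dict Int Int :=
  if d.contains point.1 = false ∨ point.2 < d.getD point.1 0 then d.insert point.1 point.2 else d

def pvStepRight (d : PySem.Dict Int Int) (point : Int × Int) : PySem.Dict Int Int :=
  if d.contains point.1 = false ∨ d.getD point.1 0 < point.2 then d.insert point.1 point.2 else d

def get_boundary (area : List (Int × Int)) : List (List (List Int)) :=
  -- the loop over area, carrying (border_up, border_bottom, border_left, border_right)
  let st := area.foldl
    (fun (st : (PySem.Dict Int Int × PySem.Dict Int Int) × (PySem.Dict Int Int × PySem.Dict Int Int)) point =>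
      ((pvStepUp st.1.1 point, pvStepBottom st.1.2 point),
       (pvStepLeft st.2.1 point, pvStepRight st.2.2 point)))
    ((PySem.Dict.empty, PySem.Dict.empty), (PySem.Dict.empty, PySem.Dict.empty))
  -- boundary = [...]; [[k, d[k]] for k in d.keys()]; sorted(..., key=lambda x: x[0])
  [st.1.1, st.1.2, st.2.1, st.2.2].map (fun d =>
    PySem.List.sorted (d.keys.map (fun k => [k, d.getD k 0])) (fun x => PySem.List.pyGetD x 0 0))

-- ===== PORT B =====
def get_boundary_alt (area : List (Int × Int)) : List (List (List Int)) :=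
  -- one grouping pass: cols[col].append(row); rows[row].append(col)
  let cr := area.foldl
    (fun (cr : PySem.Dict Int (List Int) × PySem.Dict Int (List Int)) p =>
      (cr.1.modify p.2 [] (fun g => g ++ [p.1]), cr.2.modify p.1 [] (fun g => g ++ [p.2])))
    (PySem.Dict.empty, PySem.Dict.empty)
  -- table(groups, extremum) = [[k, extremum(groups[k])] for k in sorted(groups)]
  -- Python's min(xs)/max(xs): every group is nonempty, so minD/maxD's default 0 is never used
  let table : PySem.Dict Int (List Int) → (List Int → Int) → List (List Int) :=
    fun groups extremum =>
      (PySem.List.sorted groups.keys (fun k => k)).map (fun k => [k, extremum (groups.getD k [])])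
  [table cr.1 (fun g => PySem.List.minD g (fun x => x) 0),
   table cr.1 (fun g => PySem.List.maxD g (fun x => x) 0),
   table cr.2 (fun g => PySem.List.minD g (fun x => x) 0),
   table cr.2 (fun g => PySem.List.maxD g (fun x => x) 0)]

-- ===== PRECONDITION & SPEC =====
def Spec_get_boundary (area : List (Int × Int)) (out : List (List (List Int))) : Prop := out = get_boundary_alt area
instance (area : List (Int × Int)) (out : List (List (List Int))) : Decidable (Spec_get_boundary area out) := by unfold Spec_get_boundary; infer_instance

-- ===== CLAIM (what is proved, stated in full; the proofs are below) =====
def Claim_equal_get_boundary : Prop := ∀ (area : List (Int × Int)), Dom_get_boundary area → Spec_get_boundary area (get_boundary area)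

-- ===== LEMMAS AND PROOFS =====

-- generic form of A's four loop-body updates: conditional insert keeping the r-smaller value
def pvCondStep (key val : Int × Int → Int) (r : Int → Int → Prop) [DecidableRel r]
    (d : PySem.Dict Int Int) (p : Int × Int) : PySem.Dict Int Int :=
  if d.contains (key p) = false ∨ r (val p) (d.getD (key p) 0) then d.insert (key p) (val p) else d

-- the corresponding fold on an optional running extremum (the step of PySem.List.min?/max?)
def pvOptStep (r : Int → Int → Prop) [DecidableRel r] (acc : Option Int) (x : Int) : Option Int :=
  match acc with
  | none => some x
  | some m => if r x m then some x else some m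

theorem pvStepUp_eq : pvStepUp = pvCondStep (fun p => p.2) (fun p => p.1) (· < ·) := rfl
theorem pvStepBottom_eq : pvStepBottom = pvCondStep (fun p => p.2) (fun p => p.1) (fun a b => b < a) := rfl
theorem pvStepLeft_eq : pvStepLeft = pvCondStep (fun p => p.1) (fun p => p.2) (· < ·) := rfl
theorem pvStepRight_eq : pvStepRight = pvCondStep (fun p => p.1) (fun p => p.2) (fun a b => b < a) := rfl

theorem pvMin?_eq_foldl (g : List Int) :
    PySem.List.min? g (fun x => x) = g.foldl (pvOptStep (· < ·)) none := by
  unfold PySem.List.min?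
  congr 1
  funext acc x
  cases acc <;> rfl

theorem pvMax?_eq_foldl (g : List Int) :
    PySem.List.max? g (fun x => x) = g.foldl (pvOptStep (fun a b => b < a)) none := by
  unfold PySem.List.max?
  congr 1
  funext acc x
  cases acc <;> rfl

theorem pvCondStep_get?_self (key val : Int × Int → Int) (r : Int → Int → Prop) [DecidableRel r]
    (d : PySem.Dict Int Int) (p : Int × Int) :
    (pvCondStep key val r d p).get? (key p) = pvOptStep r (d.get? (key p)) (val p) := by
  unfold pvCondStep pvOptStep
  cases h : d.get? (key p) with
  | none =>
      have hc : d.contains (key p) = false := by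
        rw [PySem.Dict.contains_eq_isSome_get?, h]; rfl
      simp [hc, PySem.Dict.get?_insert_self]
  | some w =>
      have hc : d.contains (key p) = true := by
        rw [PySem.Dict.contains_eq_isSome_get?, h]; rfl
      have hg : d.getD (key p) 0 = w := by
        rw [PySem.Dict.getD_eq_get?_getD, h]; rfl
      by_cases hr : r (val p) w
      · simp [hc, hg, hr, PySem.Dict.get?_insert_self]
      · simp [hc, hg, hr, h]

theorem pvCondStep_get?_of_ne (key val : Int × Int → Int) (r : Int → Int → Prop) [DecidableRel r]
    (d : PySem.Dict Int Int) (p : Int × Int) (k : Int) (hk : k ≠ key p) :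
    (pvCondStep key val r d p).get? k = d.get? k := by
  unfold pvCondStep
  split
  · exact PySem.Dict.get?_insert_of_ne d (val p) hk
  · rfl

theorem pv_get?_foldl (key val : Int × Int → Int) (r : Int → Int → Prop) [DecidableRel r]
    (l : List (Int × Int)) (d : PySem.Dict Int Int) (k : Int) :
    (l.foldl (pvCondStep key val r) d).get? k
      = ((l.filter (fun p => key p == k)).map val).foldl (pvOptStep r) (d.get? k) := by
  induction l generalizing d with
  | nil => rfl
  | cons p t ih =>
      by_cases hk : key p = k
      · subst hk
        simp only [List.foldl_cons, List.filter_cons, beq_self_eq_true, if_pos, List.map_cons]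
        rw [ih, pvCondStep_get?_self]
      · have : (key p == k) = false := by simp [hk]
        simp only [List.foldl_cons, List.filter_cons, this, Bool.false_eq_true, if_false]
        rw [ih, pvCondStep_get?_of_ne _ _ _ _ _ _ (Ne.symm hk)]

theorem pvCondStep_keys (key val : Int × Int → Int) (r : Int → Int → Prop) [DecidableRel r]
    (d : PySem.Dict Int Int) (p : Int × Int) :
    (pvCondStep key val r d p).keys = PySem.Set.add d.keys (key p) := by
  unfold pvCondStep PySem.Set.add
  cases hc : d.contains (key p) with
  | false =>
      have hm : key p ∉ d.keys := by
        rw [← Bool.not_eq_true] at hc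
        simpa [PySem.Dict.contains_iff_mem_keys] using hc
      simp [hm, PySem.Dict.keys_insert_of_not_contains d (val p) hc]
  | true =>
      have hm : key p ∈ d.keys := by
        simpa [PySem.Dict.contains_iff_mem_keys] using hc
      split
      · simp [hm, PySem.Dict.keys_insert_of_contains d (val p) hc]
      · simp [hm]

theorem pv_keys_foldl (key val : Int × Int → Int) (r : Int → Int → Prop) [DecidableRel r]
    (l : List (Int × Int)) (d : PySem.Dict Int Int) :
    (l.foldl (pvCondStep key val r) d).keys = PySem.Set.update d.keys (l.map key) := by
  induction l generalizing d with
  | nil => rfl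
  | cons p t ih =>
      simp only [List.foldl_cons, List.map_cons]
      rw [ih, pvCondStep_keys]
      rfl

theorem pv_update_nil (xs : List Int) :
    PySem.Set.update ([] : List Int) xs = PySem.Set.ofList xs := rfl

-- the per-dictionary table A builds, characterised as a map over the sorted distinct keys
theorem pv_table_eq (key val : Int × Int → Int) (r : Int → Int → Prop) [DecidableRel r]
    (area : List (Int × Int)) :
    PySem.List.sorted
        ((area.foldl (pvCondStep key val r) PySem.Dict.empty).keys.map
          (fun k => [k, (area.foldl (pvCondStep key val r) PySem.Dict.empty).getD k 0]))
        (fun x => PySem.List.pyGetD x 0 0)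
      = (PySem.List.sorted (PySem.Set.ofList (area.map key)) (fun k => k)).map
          (fun k => [k, (((area.filter (fun p => key p == k)).map val).foldl (pvOptStep r) none).getD 0]) := by
  have hkeys : (area.foldl (pvCondStep key val r) PySem.Dict.empty).keys
      = PySem.Set.ofList (area.map key) := by
    rw [pv_keys_foldl, PySem.Dict.keys_empty, pv_update_nil]
  have hval : ∀ k, (area.foldl (pvCondStep key val r) PySem.Dict.empty).getD k 0
      = (((area.filter (fun p => key p == k)).map val).foldl (pvOptStep r) none).getD 0 := by
    intro k
    rw [PySem.Dict.getD_eq_get?_getD, pv_get?_foldl, PySem.Dict.get?_empty]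
  apply PySem.List.sorted_eq_of_perm_of_pairwise_lt
  · have hmap : (PySem.Set.ofList (area.map key)).map
        (fun k => [k, (((area.filter (fun p => key p == k)).map val).foldl (pvOptStep r) none).getD 0])
        = (PySem.Set.ofList (area.map key)).map
          (fun k => [k, (area.foldl (pvCondStep key val r) PySem.Dict.empty).getD k 0]) :=
      List.map_congr_left (fun k _ => by rw [hval])
    rw [hkeys, ← hmap]
    exact List.Perm.map _ (PySem.List.sorted_perm _ _ _)
  · rw [List.pairwise_map]
    have := PySem.List.sorted_ofList_pairwise_lt (area.map key)
    refine this.imp ?_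
    intro a b hab
    simpa [PySem.List.pyGetD_zero_cons] using hab
  
-- B's grouping dictionary, characterised key-by-key
theorem pv_group_keys (l : List (Int × Int)) (key val : Int × Int → Int) :
    (l.foldl (fun d p => d.modify (key p) [] (fun g => g ++ [val p])) PySem.Dict.empty).keys
      = PySem.Set.ofList (l.map key) := by
  rw [PySem.Dict.keys_foldl_modify_key l key [] (fun _ p => fun g => g ++ [val p]),
    PySem.Dict.keys_empty, pv_update_nil]

theorem pv_group_getD (l : List (Int × Int)) (key val : Int × Int → Int) (c : Int) :
    (l.foldl (fun d p => d.modify (key p) [] (fun g => g ++ [val p])) PySem.Dict.empty).getD c []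
      = (l.filter (fun p => key p == c)).map val := by
  have h : (l.foldl (fun d p => d.modify (key p) [] (fun g => g ++ [val p])) PySem.Dict.empty)
      = ((l.map (fun p => (key p, val p))).foldl
          (fun d q => d.modify q.1 [] (fun g => g ++ [q.2])) PySem.Dict.empty) := by
    rw [List.foldl_map]
  rw [h, PySem.Dict.getD_foldl_modify_append]
  simp [List.filter_map, Function.comp_def]

-- A's fold over the 4-tuple of dicts splits into four independent folds
theorem pv_foldA (l : List (Int × Int)) :
    l.foldl
      (fun (st : (PySem.Dict Int Int × PySem.Dict Int Int) × (PySem.Dict Int Int × PySem.Dict Int Int)) point =>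
        ((pvStepUp st.1.1 point, pvStepBottom st.1.2 point),
         (pvStepLeft st.2.1 point, pvStepRight st.2.2 point)))
      ((PySem.Dict.empty, PySem.Dict.empty), (PySem.Dict.empty, PySem.Dict.empty))
    = ((l.foldl pvStepUp PySem.Dict.empty, l.foldl pvStepBottom PySem.Dict.empty),
       (l.foldl pvStepLeft PySem.Dict.empty, l.foldl pvStepRight PySem.Dict.empty)) := by
  rw [PySem.List.foldl_prod_mk
      (fun (s : PySem.Dict Int Int × PySem.Dict Int Int) e => (pvStepUp s.1 e, pvStepBottom s.2 e))
      (fun (s : PySem.Dict Int Int × PySem.Dict Int Int) e => (pvStepLeft s.1 e, pvStepRight s.2 e)),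
    PySem.List.foldl_prod_mk, PySem.List.foldl_prod_mk]

-- each of B's four tables, rewritten to the same normal form as pv_table_eq's right-hand side
theorem pv_tableB (area : List (Int × Int)) (key val : Int × Int → Int)
    (r : Int → Int → Prop) [DecidableRel r]
    (ext : List Int → Int)
    (hext : ∀ g : List Int, ext g = (g.foldl (pvOptStep r) none).getD 0) :
    (PySem.List.sorted
        ((area.foldl (fun d p => d.modify (key p) [] (fun g => g ++ [val p])) PySem.Dict.empty).keys)
        (fun k => k)).map
      (fun k => [k, ext ((area.foldl (fun d p => d.modify (key p) [] (fun g => g ++ [val p])) PySem.Dict.empty).getD k [])])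
    = (PySem.List.sorted (PySem.Set.ofList (area.map key)) (fun k => k)).map
        (fun k => [k, (((area.filter (fun p => key p == k)).map val).foldl (pvOptStep r) none).getD 0]) := by
  rw [pv_group_keys]
  exact List.map_congr_left (fun k _ => by rw [pv_group_getD, hext])

theorem pv_minD_eq (g : List Int) :
    PySem.List.minD g (fun x => x) 0 = (g.foldl (pvOptStep (· < ·)) none).getD 0 := by
  unfold PySem.List.minD
  rw [pvMin?_eq_foldl]

theorem pv_maxD_eq (g : List Int) :
    PySem.List.maxD g (fun x => x) 0 = (g.foldl (pvOptStep (fun a b => b < a)) none).getD 0 := by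
  unfold PySem.List.maxD
  rw [pvMax?_eq_foldl]

-- ===== VERDICT (by name: the statement is the Claim_ definition above) =====
theorem get_boundary_spec : Claim_equal_get_boundary := by
  intro area _
  unfold Spec_get_boundary
  show get_boundary area = get_boundary_alt area
  simp only [get_boundary, get_boundary_alt]
  rw [pv_foldA,
    PySem.List.foldl_prod_mk
      (fun (d : PySem.Dict Int (List Int)) (p : Int × Int) => d.modify p.2 [] (fun g => g ++ [p.1]))
      (fun (d : PySem.Dict Int (List Int)) (p : Int × Int) => d.modify p.1 [] (fun g => g ++ [p.2]))]
  simp only [List.map_cons, List.map_nil]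
  rw [pvStepUp_eq, pvStepBottom_eq, pvStepLeft_eq, pvStepRight_eq,
    pv_table_eq, pv_table_eq, pv_table_eq, pv_table_eq,
    pv_tableB area (fun p => p.2) (fun p => p.1) (· < ·) _ pv_minD_eq,
    pv_tableB area (fun p => p.2) (fun p => p.1) (fun a b => b < a) _ pv_maxD_eq,
    pv_tableB area (fun p => p.1) (fun p => p.2) (· < ·) _ pv_minD_eq,
    pv_tableB area (fun p => p.1) (fun p => p.2) (fun a b => b < a) _ pv_maxD_eq]
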